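-- pv_equiv track=rewrite | github.com/felix-zaslavskiy/large-language-model-chats | format_chat.py | transform_lines
-- ===== SOURCE A (Python) =====
-- def transform_lines(lines):
--     output_lines = []
--     inside_header = True
--     inside_blockquote = False
--
--     for line in lines:
--         if inside_header:
--             output_lines.append(line)
--             if line.startswith("> **"):
--                 inside_header = False
--                 inside_blockquote = True
--                 output_lines.append(">\n")
--         elif inside_blockquote:
--             if line.startswith("> **"):
--                 if not output_lines[-1].startswith(">"):
--                     output_lines.append(">\n")
--                 output_lines.append(line)
--                 output_lines.append(">\n")
--             else:
--                 if line.strip():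
--                     output_lines.append("> " + line)
--                 else:
--                     output_lines.append(">\n")
--
--     return output_lines
-- ===== SOURCE B (Python) =====
-- def transform_lines(lines):
--     lines = list(lines)
--     split = next((i for i, l in enumerate(lines) if l.startswith("> **")), None)
--     if split is None:
--         return lines
--
--     def fmt(l):
--         if l.startswith("> **"):
--             return [l, ">\n"]
--         if l.strip():
--             return ["> " + l]
--         return [">\n"]
--
--     return lines[:split + 1] + [">\n"] + [s for l in lines[split + 1:] for s in fmt(l)]
-- ===== Notes on version B (the rewrite author's own statement) =====
-- stated objective: simpler
-- what changed: Replaces A's flag-driven single-pass state machine with a declarative find-split construction: locate the first '> **' line, return it unchanged via a prefix slice plus '>\n', and flatten a per-line formatter over the suffix slice; the unreachable output[-1].startswith('>') guard disappears.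
import Mathlib
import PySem

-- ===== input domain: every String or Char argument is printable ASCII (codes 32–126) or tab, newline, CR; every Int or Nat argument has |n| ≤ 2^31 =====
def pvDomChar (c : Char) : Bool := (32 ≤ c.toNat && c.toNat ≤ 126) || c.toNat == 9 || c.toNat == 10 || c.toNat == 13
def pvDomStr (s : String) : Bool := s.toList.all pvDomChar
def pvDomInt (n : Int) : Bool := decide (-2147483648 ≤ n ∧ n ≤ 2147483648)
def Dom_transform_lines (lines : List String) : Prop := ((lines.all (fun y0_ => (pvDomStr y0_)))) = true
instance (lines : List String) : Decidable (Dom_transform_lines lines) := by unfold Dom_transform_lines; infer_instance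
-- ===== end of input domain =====

-- B replaces A's flag-driven state machine with a declarative find-split construction
-- (locate the first "> **" line, slice, flatten a formatter over the suffix); objective: simpler.

-- ===== PORT A =====
-- literal transliteration of A's loop body over state (output_lines, inside_header, inside_blockquote).
-- output_lines[-1] is read via pyGetD with default "": the branch is only reached with a nonempty
-- output_lines (inside_blockquote implies earlier appends), so Python never raises there.
def tlA_step (st : List String × Bool × Bool) (line : String) : List String × Bool × Bool :=
  match st with
  | (out, insideHeader, insideBlockquote) =>
    if insideHeader then
      let out := out ++ [line]
      if PySem.Str.startswith line "> **" then (out ++ [">\n"], false, true)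
      else (out, insideHeader, insideBlockquote)
    else if insideBlockquote then
      if PySem.Str.startswith line "> **" then
        let out := if ! PySem.Str.startswith (PySem.List.pyGetD out (-1) "") ">" then out ++ [">\n"] else out
        (out ++ [line] ++ [">\n"], insideHeader, insideBlockquote)
      else if PySem.Str.strip line ≠ "" then (out ++ ["> " ++ line], insideHeader, insideBlockquote)
      else (out ++ [">\n"], insideHeader, insideBlockquote)
    else st

def transform_lines (lines : List String) : List String :=
  (lines.foldl tlA_step ([], true, false)).1

-- ===== PORT B =====
-- Source B's fmt: the items produced for one line after the split point
def tlB_fmt (l : String) : List String :=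
  if PySem.Str.startswith l "> **" then [l, ">\n"]
  else if PySem.Str.strip l ≠ "" then ["> " ++ l]
  else [">\n"]

-- Source B: find the first "> **" line (next over enumerate); if none, return lines;
-- else prefix slice + [">\n"] + flattened comprehension over the suffix slice
def transform_lines_alt (lines : List String) : List String :=
  match lines.findIdx? (fun l => PySem.Str.startswith l "> **") with
  | none => lines
  | some split => lines.take (split + 1) ++ [">\n"] ++ (lines.drop (split + 1)).flatMap tlB_fmt

-- ===== PRECONDITION & SPEC =====
def Spec_transform_lines (lines : List String) (out : List String) : Prop := out = transform_lines_alt lines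
instance (lines : List String) (out : List String) : Decidable (Spec_transform_lines lines out) := by unfold Spec_transform_lines; infer_instance

-- ===== CLAIM (what is proved, stated in full; the proofs are below) =====
def Claim_equal_transform_lines : Prop := ∀ (lines : List String), Dom_transform_lines lines → Spec_transform_lines lines (transform_lines lines)

-- ===== LEMMAS AND PROOFS =====

theorem startswith_gt_append (line : String) :
    PySem.Chars.startswith ("> " ++ line).toList ['>'] = true := by
  simp [PySem.Chars.startswith_iff]

theorem pyGetD_last_append_two (out : List String) (x y : String) :
    PySem.List.pyGetD (out ++ [x, y]) (-1) "" = y := by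
  rw [show out ++ [x, y] = (out ++ [x]) ++ [y] by simp,
    PySem.List.pyGetD_neg_one_append_singleton]

-- in the blockquote phase, if the last output element starts with ">", A's fold appends
-- exactly tlB_fmt of each line and the flags never change
theorem quote_phase (rest : List String) : ∀ (out : List String),
    PySem.Chars.startswith (PySem.List.pyGetD out (-1) "").toList ['>'] = true →
    rest.foldl tlA_step (out, false, true) = (out ++ rest.flatMap tlB_fmt, false, true) := by
  induction rest with
  | nil => intro out _; simp
  | cons line rest ih =>
    intro out hlast
    simp only [List.foldl_cons, List.flatMap_cons]
    by_cases h1 : PySem.Chars.startswith line.toList ['>', ' ', '*', '*'] = true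
    · have hstep : tlA_step (out, false, true) line = (out ++ [line] ++ [">\n"], false, true) := by
        simp [tlA_step, h1, hlast]
      rw [hstep, show (out ++ [line] ++ [">\n"]) = out ++ [line, ">\n"] by simp,
        ih _ (by rw [pyGetD_last_append_two]; decide)]
      simp [tlB_fmt, h1]
    · by_cases h2 : PySem.Str.strip line ≠ ""
      · have hstep : tlA_step (out, false, true) line = (out ++ ["> " ++ line], false, true) := by
          simp [tlA_step, h1, h2]
        rw [hstep, ih _ (by rw [PySem.List.pyGetD_neg_one_append_singleton]; exact startswith_gt_append line)]
        simp [tlB_fmt, h1, h2]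
      · have hstep : tlA_step (out, false, true) line = (out ++ [">\n"], false, true) := by
          simp [tlA_step, h1, h2]
        rw [hstep, ih _ (by rw [PySem.List.pyGetD_neg_one_append_singleton]; decide)]
        simp [tlB_fmt, h1, h2]

-- unfolding B at a non-matching head line
theorem alt_cons_neg (line : String) (rest : List String)
    (h1 : ¬ PySem.Chars.startswith line.toList ['>', ' ', '*', '*'] = true) :
    transform_lines_alt (line :: rest) = line :: transform_lines_alt rest := by
  unfold transform_lines_alt
  rw [List.findIdx?_cons]
  have he : ("> **".toList) = ['>', ' ', '*', '*'] := rfl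
  simp only [PySem.Str.startswith, he] at *
  rw [if_neg h1]
  cases List.findIdx? (fun l => PySem.Chars.startswith l.toList ['>', ' ', '*', '*']) rest <;>
    simp

-- in the header phase, A's fold produces out ++ B's result for the remaining lines
theorem header_phase (lines : List String) : ∀ (out : List String),
    (lines.foldl tlA_step (out, true, false)).1 = out ++ transform_lines_alt lines := by
  induction lines with
  | nil => intro out; simp [transform_lines_alt]
  | cons line rest ih =>
    intro out
    simp only [List.foldl_cons]
    by_cases h1 : PySem.Chars.startswith line.toList ['>', ' ', '*', '*'] = true
    · have hstep : tlA_step (out, true, false) line = (out ++ [line] ++ [">\n"], false, true) := by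
        simp [tlA_step, h1]
      rw [hstep, show (out ++ [line] ++ [">\n"]) = out ++ [line, ">\n"] by simp,
        quote_phase rest _ (by rw [pyGetD_last_append_two]; decide)]
      simp [transform_lines_alt, List.findIdx?_cons, PySem.Str.startswith, h1]
    · have hstep : tlA_step (out, true, false) line = (out ++ [line], true, false) := by
        simp [tlA_step, h1]
      rw [hstep, ih, alt_cons_neg line rest h1]
      simp

-- ===== VERDICT (by name: the statement is the Claim_ definition above) =====
theorem transform_lines_spec : Claim_equal_transform_lines := by
  intro lines _
  show transform_lines lines = transform_lines_alt lines
  simpa [transform_lines] using header_phase lines []
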